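-- pv_equiv track=rewrite | github.com/dinhlong1/BaiTap | mangsonguyen.py | reverse_the_order_of_even_numbers_in_array
-- ===== SOURCE A (Python) =====
-- def reverse_the_order_of_even_numbers_in_array(list):
--     for i in range(0, len(list)):
--         if list[i] % 2 == 0:
--             for t in range(i+1 , len(list)):
--                 if list[t] % 2 == 0:
--                     temp = list[i]
--                     list[i] = list[t]
--                     list[t] =temp
--     return list
-- ===== SOURCE B (Python) =====
-- def reverse_the_order_of_even_numbers_in_array(list):
--     # One pass to collect evens; if any, write them back reversed (mutates in place, like A).
--     evens = [x for x in list if x % 2 == 0]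
--     if evens:
--         evens.reverse()
--         j = 0
--         for i in range(len(list)):
--             if list[i] % 2 == 0:
--                 list[i] = evens[j]
--                 j += 1
--     return list
-- ===== Notes on version B (the rewrite author's own statement) =====
-- stated objective: alternative
-- what changed: Replaces A's nested index loops of repeated pairwise swaps with a single pass that collects the even values and, if any, writes them back in reverse order.
import Mathlib
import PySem

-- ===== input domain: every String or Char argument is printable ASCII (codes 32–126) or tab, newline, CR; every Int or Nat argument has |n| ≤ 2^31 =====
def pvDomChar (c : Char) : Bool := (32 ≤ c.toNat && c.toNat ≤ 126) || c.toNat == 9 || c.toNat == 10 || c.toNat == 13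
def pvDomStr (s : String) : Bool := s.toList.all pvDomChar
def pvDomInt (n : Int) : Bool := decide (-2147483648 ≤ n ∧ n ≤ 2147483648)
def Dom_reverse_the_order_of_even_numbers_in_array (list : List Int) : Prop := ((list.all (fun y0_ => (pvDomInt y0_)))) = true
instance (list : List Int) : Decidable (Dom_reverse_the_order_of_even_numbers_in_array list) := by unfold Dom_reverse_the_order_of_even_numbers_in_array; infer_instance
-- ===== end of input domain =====

-- B replaces A's nested swap loops by one pass collecting the even values and writing them back
-- reversed; both Pythons mutate the argument in place identically, the equivalence proved here is
-- about the return value.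


-- ===== PORT A =====
-- inner loop body: `temp = list[i]; list[i] = list[t]; list[t] = temp` guarded by `list[t] % 2 == 0`
def pvSwapStep (i : Nat) (l : List Int) (t : Nat) : List Int :=
  if l.getD t 0 % 2 == 0 then (l.set i (l.getD t 0)).set t (l.getD i 0) else l

-- outer loop body: `if list[i] % 2 == 0: for t in range(i+1, len(list)): ...`
def pvOuterStep (l : List Int) (i : Nat) : List Int :=
  if l.getD i 0 % 2 == 0 then (List.range' (i+1) (l.length - (i+1))).foldl (pvSwapStep i) l else l

def reverse_the_order_of_even_numbers_in_array (list : List Int) : List Int :=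
  (List.range list.length).foldl pvOuterStep list

-- ===== PORT B =====
-- the write-back pass: replace each even element by the next value of `ev`
def pvFill : List Int → List Int → List Int
  | [], _ => []
  | x :: xs, ev => if x % 2 == 0 then ev.headD 0 :: pvFill xs ev.tail else x :: pvFill xs ev

def reverse_the_order_of_even_numbers_in_array_alt (list : List Int) : List Int :=
  let evens := list.filter (fun x => x % 2 == 0)
  if evens.isEmpty then list else pvFill list evens.reverse

-- ===== PRECONDITION & SPEC =====
def Spec_reverse_the_order_of_even_numbers_in_array (list : List Int) (out : List Int) : Prop := out = reverse_the_order_of_even_numbers_in_array_alt list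
instance (list : List Int) (out : List Int) : Decidable (Spec_reverse_the_order_of_even_numbers_in_array list out) := by unfold Spec_reverse_the_order_of_even_numbers_in_array; infer_instance

-- ===== CLAIM (what is proved, stated in full; the proofs are below) =====
def Claim_equal_reverse_the_order_of_even_numbers_in_array : Prop := ∀ (list : List Int), Dom_reverse_the_order_of_even_numbers_in_array list → Spec_reverse_the_order_of_even_numbers_in_array list (reverse_the_order_of_even_numbers_in_array list)

-- ===== LEMMAS AND PROOFS =====

-- `pvScan c s` is the effect of A's inner loop on the held value `c` (at index i) and the suffix `s`:
-- each even element of `s` receives the currently held value and donates its own.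
def pvScan : Int → List Int → Int × List Int
  | c, [] => (c, [])
  | c, x :: xs =>
    if x % 2 == 0 then let p := pvScan x xs; (p.1, c :: p.2)
    else let p := pvScan c xs; (p.1, x :: p.2)

lemma pvScan_len (c : Int) (s : List Int) : (pvScan c s).2.length = s.length := by
  induction s generalizing c with
  | nil => simp [pvScan]
  | cons x xs ih => simp only [pvScan]; split <;> simp [ih]

-- `pvF` is A's outer loop rephrased as structural recursion on the suffix it still has to process.
def pvF : List Int → List Int
  | [] => []
  | x :: xs =>
    if x % 2 == 0 then (pvScan x xs).1 :: pvF (pvScan x xs).2 else x :: pvF xs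
termination_by l => l.length
decreasing_by all_goals simp [pvScan_len]

-- positional getD/set helpers
lemma getD_mid (p s : List Int) (x : Int) : (p ++ x :: s).getD p.length 0 = x := by
  simp [List.getD_eq_getElem?_getD]

lemma set_mid (p s : List Int) (x v : Int) : (p ++ x :: s).set p.length v = p ++ v :: s := by
  induction p with
  | nil => simp
  | cons a p ih => simp [ih]

-- the inner loop, started after an already-processed middle `m`, performs `pvScan c s`
lemma inner_spec (p : List Int) (c : Int) (m s : List Int) :
    (List.range' (p.length + 1 + m.length) s.length).foldl (pvSwapStep p.length)
      (p ++ c :: (m ++ s))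
    = p ++ (pvScan c s).1 :: (m ++ (pvScan c s).2) := by
  induction s generalizing c m with
  | nil => simp [pvScan]
  | cons x xs ih =>
    rw [List.length_cons, List.range'_succ, List.foldl_cons]
    have hread : (p ++ c :: (m ++ x :: xs)).getD (p.length + 1 + m.length) 0 = x := by
      have : p ++ c :: (m ++ x :: xs) = (p ++ c :: m) ++ x :: xs := by simp
      rw [this]
      have hlen : (p ++ c :: m).length = p.length + 1 + m.length := by simp; omega
      rw [← hlen, getD_mid]
    by_cases hx : x % 2 == 0
    · have hstep : pvSwapStep p.length (p ++ c :: (m ++ x :: xs)) (p.length + 1 + m.length)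
          = p ++ x :: (m ++ c :: xs) := by
        unfold pvSwapStep
        rw [hread, if_pos hx, getD_mid]
        rw [set_mid]
        have : p ++ x :: (m ++ x :: xs) = (p ++ x :: m) ++ x :: xs := by simp
        rw [this]
        have hlen : (p ++ x :: m).length = p.length + 1 + m.length := by simp; omega
        rw [← hlen, set_mid]
        simp
      rw [hstep]
      have hrw : p ++ x :: (m ++ c :: xs) = p ++ x :: ((m ++ [c]) ++ xs) := by simp
      rw [hrw]
      have hlen2 : p.length + 1 + m.length + 1 = p.length + 1 + (m ++ [c]).length := by
        simp only [List.length_append, List.length_cons, List.length_nil]; omega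
      rw [hlen2, ih x (m ++ [c])]
      simp [pvScan, hx]
    · have hstep : pvSwapStep p.length (p ++ c :: (m ++ x :: xs)) (p.length + 1 + m.length)
          = p ++ c :: (m ++ x :: xs) := by
        unfold pvSwapStep
        rw [hread, if_neg hx]
      rw [hstep]
      have hrw : p ++ c :: (m ++ x :: xs) = p ++ c :: ((m ++ [x]) ++ xs) := by simp
      rw [hrw]
      have hlen2 : p.length + 1 + m.length + 1 = p.length + 1 + (m ++ [x]).length := by
        simp only [List.length_append, List.length_cons, List.length_nil]; omega
      rw [hlen2, ih c (m ++ [x])]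
      simp [pvScan, hx]

-- the outer loop from position |p| on `p ++ s` computes `pvF s` on the suffix
lemma outer_spec (n : Nat) (s p : List Int) (hn : s.length = n) :
    (List.range' p.length s.length).foldl pvOuterStep (p ++ s) = p ++ pvF s := by
  induction n generalizing s p with
  | zero => simp [List.length_eq_zero_iff.mp hn, pvF]
  | succ k ih =>
    match s with
    | x :: xs =>
      rw [List.length_cons, List.range'_succ, List.foldl_cons]
      have hread : (p ++ x :: xs).getD p.length 0 = x := getD_mid p xs x
      by_cases hx : x % 2 == 0
      · have hstep : pvOuterStep (p ++ x :: xs) p.length = p ++ (pvScan x xs).1 :: (pvScan x xs).2 := by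
          unfold pvOuterStep
          rw [hread, if_pos hx]
          have hlen : (p ++ x :: xs).length - (p.length + 1) = xs.length := by simp; omega
          rw [hlen]
          have := inner_spec p x [] xs
          simpa using this
        rw [hstep]
        have hrw : p ++ (pvScan x xs).1 :: (pvScan x xs).2 = (p ++ [(pvScan x xs).1]) ++ (pvScan x xs).2 := by simp
        have hplen : p.length + 1 = (p ++ [(pvScan x xs).1]).length := by simp
        have hxlen : xs.length = (pvScan x xs).2.length := (pvScan_len x xs).symm
        rw [hrw, hplen, hxlen, ih (pvScan x xs).2 (p ++ [(pvScan x xs).1])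
          (by rw [pvScan_len]; simpa using hn)]
        simp [pvF, hx]
      · have hstep : pvOuterStep (p ++ x :: xs) p.length = p ++ x :: xs := by
          unfold pvOuterStep
          rw [hread, if_neg hx]
        rw [hstep]
        have hrw : p ++ x :: xs = (p ++ [x]) ++ xs := by simp
        have hplen : p.length + 1 = (p ++ [x]).length := by simp
        rw [hrw, hplen, ih xs (p ++ [x]) (by simpa using hn)]
        simp [pvF, hx]

-- pvScan characterised by the even values: result head is the last even, the rest shift down
lemma pvScan_spec (s : List Int) (c : Int) :
    pvScan c s = ((c :: s.filter (fun x => x % 2 == 0)).getLast (by simp),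
                  pvFill s ((c :: s.filter (fun x => x % 2 == 0)).dropLast)) := by
  induction s generalizing c with
  | nil => simp [pvScan, pvFill]
  | cons x xs ih =>
    by_cases hx : x % 2 == 0
    · simp only [pvScan, if_pos hx, ih x]
      have hfil : (x :: xs).filter (fun x => x % 2 == 0) = x :: xs.filter (fun x => x % 2 == 0) := by
        simp [hx]
      rw [hfil]
      simp [List.getLast_cons, List.dropLast_cons_of_ne_nil, pvFill, hx]
    · simp only [pvScan, if_neg hx, ih c]
      have hfil : (x :: xs).filter (fun x => x % 2 == 0) = xs.filter (fun x => x % 2 == 0) := by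
        simp [hx]
      rw [hfil]
      simp [pvFill, hx]

-- filling with a list of evens of the right length is idempotent in the mask
lemma pvFill_len (s ev : List Int) : (pvFill s ev).length = s.length := by
  induction s generalizing ev with
  | nil => simp [pvFill]
  | cons x xs ih => simp only [pvFill]; split <;> simp [ih]

lemma filter_pvFill (s ev : List Int) (hev : ∀ a ∈ ev, a % 2 == 0)
    (hlen : ev.length = (s.filter (fun x => x % 2 == 0)).length) :
    (pvFill s ev).filter (fun x => x % 2 == 0) = ev := by
  induction s generalizing ev with
  | nil =>
    simp only [List.filter_nil, List.length_nil] at hlen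
    simp [pvFill, List.length_eq_zero_iff.mp hlen]
  | cons x xs ih =>
    by_cases hx : x % 2 == 0
    · have hfil : (x :: xs).filter (fun x => x % 2 == 0) = x :: xs.filter (fun x => x % 2 == 0) := by
        simp [hx]
      rw [hfil] at hlen
      match ev, hlen with
      | e :: ev', hlen =>
        simp only [pvFill, if_pos hx, List.headD_cons, List.tail_cons]
        have he : (e % 2 == 0) = true := hev e (by simp)
        rw [List.filter_cons, if_pos he, ih ev' (fun a ha => hev a (by simp [ha])) (by simpa using hlen)]
    · have hfil : (x :: xs).filter (fun x => x % 2 == 0) = xs.filter (fun x => x % 2 == 0) := by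
        simp [hx]
      rw [hfil] at hlen
      simp only [pvFill, if_neg hx]
      rw [List.filter_cons]
      simp only [hx]
      exact ih ev hev hlen

lemma pvFill_pvFill (s ev ev' : List Int) (hev : ∀ a ∈ ev, a % 2 == 0)
    (hlen : ev.length = (s.filter (fun x => x % 2 == 0)).length) :
    pvFill (pvFill s ev) ev' = pvFill s ev' := by
  induction s generalizing ev ev' with
  | nil => simp [pvFill]
  | cons x xs ih =>
    by_cases hx : x % 2 == 0
    · have hfil : (x :: xs).filter (fun x => x % 2 == 0) = x :: xs.filter (fun x => x % 2 == 0) := by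
        simp [hx]
      rw [hfil] at hlen
      match ev, hlen with
      | e :: ev'', hlen =>
        have he : (e % 2 == 0) = true := hev e (by simp)
        simp only [pvFill, if_pos hx, List.headD_cons, List.tail_cons, if_pos he]
        rw [ih ev'' ev'.tail (fun a ha => hev a (by simp [ha])) (by simpa using hlen)]
    · simp only [pvFill, if_neg hx]
      have hfil : (x :: xs).filter (fun x => x % 2 == 0) = xs.filter (fun x => x % 2 == 0) := by
        simp [hx]
      rw [hfil] at hlen
      rw [ih ev ev' hev hlen]

lemma filter_even (s : List Int) : ∀ a ∈ s.filter (fun x => x % 2 == 0), a % 2 == 0 := by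
  intro a ha; exact (List.mem_filter.mp ha).2

lemma reverse_nonempty_head {l : List Int} (h : l ≠ []) :
    l.reverse = l.getLast h :: l.dropLast.reverse := by
  conv_lhs => rw [← List.dropLast_append_getLast h]
  simp

-- the main characterisation: A's outer loop reverses the even values in place
lemma pvF_spec (n : Nat) (s : List Int) (hn : s.length = n) :
    pvF s = pvFill s ((s.filter (fun x => x % 2 == 0)).reverse) := by
  induction n generalizing s with
  | zero => simp [List.length_eq_zero_iff.mp hn, pvF, pvFill]
  | succ k ih =>
    match s with
    | x :: xs =>
      by_cases hx : x % 2 == 0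
      · have hfil : (x :: xs).filter (fun x => x % 2 == 0) = x :: xs.filter (fun x => x % 2 == 0) := by
          simp [hx]
        rw [hfil]
        simp only [pvF, if_pos hx, pvScan_spec xs x]
        set E := x :: xs.filter (fun x => x % 2 == 0) with hE
        have hEne : E ≠ [] := by simp [hE]
        have hdl_even : ∀ a ∈ E.dropLast, a % 2 == 0 := by
          intro a ha
          have : a ∈ E := List.dropLast_subset _ ha
          rcases List.mem_cons.mp this with h | h
          · subst h; exact hx
          · exact filter_even xs a h
        have hdl_len : E.dropLast.length = (xs.filter (fun x => x % 2 == 0)).length := by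
          simp [hE]
        have hys_len : (pvFill xs E.dropLast).length = xs.length := pvFill_len _ _
        rw [ih (pvFill xs E.dropLast) (by rw [hys_len]; simpa using hn)]
        rw [filter_pvFill xs E.dropLast hdl_even hdl_len]
        rw [pvFill_pvFill xs E.dropLast _ hdl_even hdl_len]
        rw [reverse_nonempty_head hEne]
        simp only [pvFill, hx, if_pos, List.headD_cons, List.tail_cons]
        rfl
      · have hfil : (x :: xs).filter (fun x => x % 2 == 0) = xs.filter (fun x => x % 2 == 0) := by
          simp [hx]
        rw [hfil]
        simp only [pvF, if_neg hx]
        rw [ih xs (by simpa using hn)]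
        simp [pvFill, hx]

-- a list without even elements is returned unchanged by the write-back pass
lemma pvFill_of_no_evens (l : List Int) (h : l.filter (fun x => x % 2 == 0) = []) :
    pvFill l [] = l := by
  induction l with
  | nil => simp [pvFill]
  | cons x xs ih =>
    rw [List.filter_cons] at h
    by_cases hx : x % 2 == 0
    · simp [hx] at h
    · simp only [hx, if_neg (by simp [hx] : ¬ ((x % 2 == 0) = true))] at h
      simp [pvFill, hx, ih h]

-- ===== VERDICT (by name: the statement is the Claim_ definition above) =====
theorem reverse_the_order_of_even_numbers_in_array_spec : Claim_equal_reverse_the_order_of_even_numbers_in_array := by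
  intro list _
  unfold Spec_reverse_the_order_of_even_numbers_in_array
  unfold reverse_the_order_of_even_numbers_in_array reverse_the_order_of_even_numbers_in_array_alt
  rw [List.range_eq_range']
  have h := outer_spec list.length list [] rfl
  simp only [List.length_nil, List.nil_append] at h
  rw [h, pvF_spec list.length list rfl]
  by_cases hemp : list.filter (fun x => x % 2 == 0) = []
  · simp [hemp, pvFill_of_no_evens list hemp]
  · simp [List.isEmpty_iff, hemp]
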